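-- pv_equiv track=rewrite | github.com/JawshDolgin/Halcyon | Halcyon.py | count
-- ===== SOURCE A (Python) =====
-- def count(valid, time, userIn, average):
--     lst = []
--     for v in range(len(valid)):
--         steppin = 0
--         count = 0
--         for day in range(len(time)):
--             if time[day] == valid[v]:
--                 steppin += userIn[day]
--                 count += 1
--         if average == 0:
--             lst.append(steppin)
--         else:
--             try:
--                 lst.append(steppin // count)
--             except ZeroDivisionError:
--                 lst.append(0)
--     return lst
-- ===== SOURCE B (Python) =====
-- def count(valid, time, userIn, average):
--     sums = {}
--     counts = {}
--     for t, u in zip(time, userIn):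
--         sums[t] = sums.get(t, 0) + u
--         counts[t] = counts.get(t, 0) + 1
--     if average == 0:
--         return [sums.get(v, 0) for v in valid]
--     return [sums.get(v, 0) // counts[v] if counts.get(v, 0) else 0 for v in valid]
-- ===== Notes on version B (the rewrite author's own statement) =====
-- stated objective: faster
-- what changed: Replaces the nested scan (for each valid value, rescan all of time) by one pass over zip(time, userIn) building sum and count dictionaries keyed by time value, then one dictionary lookup per valid entry.
import Mathlib
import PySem

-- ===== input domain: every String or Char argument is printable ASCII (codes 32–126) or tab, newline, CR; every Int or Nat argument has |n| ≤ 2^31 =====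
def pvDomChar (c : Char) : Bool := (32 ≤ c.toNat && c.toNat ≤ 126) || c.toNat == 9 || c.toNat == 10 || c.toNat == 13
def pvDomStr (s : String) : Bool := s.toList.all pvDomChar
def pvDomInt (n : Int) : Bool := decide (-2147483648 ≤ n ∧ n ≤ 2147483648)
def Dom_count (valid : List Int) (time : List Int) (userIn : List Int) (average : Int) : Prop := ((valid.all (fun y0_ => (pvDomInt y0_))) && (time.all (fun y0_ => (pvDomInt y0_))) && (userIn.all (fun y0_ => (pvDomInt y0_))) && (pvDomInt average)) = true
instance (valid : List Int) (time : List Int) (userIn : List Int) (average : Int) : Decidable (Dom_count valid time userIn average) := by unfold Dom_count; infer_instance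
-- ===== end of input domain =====

-- B replaces A's nested rescan of `time` per valid value by one pass over zip(time, userIn)
-- building sum/count dictionaries, then one lookup per valid entry (objective: faster).

-- ===== PORT A =====
def count (valid : List Int) (time : List Int) (userIn : List Int) (average : Int) : List Int :=
  (PySem.List.pyRange 0 valid.length 1).foldl (fun lst v =>
    let sc : Int × Int :=
      (PySem.List.pyRange 0 time.length 1).foldl (fun (p : Int × Int) day =>
        if PySem.List.pyGetD time day 0 = PySem.List.pyGetD valid v 0 then
          (p.1 + PySem.List.pyGetD userIn day 0, p.2 + 1)
        else p) (0, 0)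
    if average = 0 then lst ++ [sc.1]
    else lst ++ [if sc.2 = 0 then 0 else PySem.Int.floordiv sc.1 sc.2]) []

-- ===== PORT B =====
def count_alt (valid : List Int) (time : List Int) (userIn : List Int) (average : Int) : List Int :=
  let ps := time.zip userIn
  let dicts : PySem.Dict Int Int × PySem.Dict Int Int :=
    ps.foldl (fun d p =>
      (d.1.insert p.1 (d.1.getD p.1 0 + p.2), d.2.insert p.1 (d.2.getD p.1 0 + 1)))
      (PySem.Dict.empty, PySem.Dict.empty)
  let sums := dicts.1
  let counts := dicts.2
  if average = 0 then
    valid.map (fun v => sums.getD v 0)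
  else
    valid.map (fun v =>
      if counts.getD v 0 ≠ 0 then PySem.Int.floordiv (sums.getD v 0) (counts.getD v 0) else 0)

-- ===== PRECONDITION & SPEC =====
-- Pre_ excludes exactly the inputs on which A raises IndexError: a time entry at an index
-- ≥ len(userIn) (i.e. in time.drop userIn.length) that occurs in valid makes A read userIn[day].
def Pre_count (valid : List Int) (time : List Int) (userIn : List Int) (average : Int) : Prop :=
  ∀ t ∈ time.drop userIn.length, t ∉ valid
instance (valid : List Int) (time : List Int) (userIn : List Int) (average : Int) : Decidable (Pre_count valid time userIn average) := by unfold Pre_count; infer_instance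

def pvWitness_count : List Int × List Int × List Int × Int := ([1, 2], [1, 1, 2], [10, 20, 31], 1)

def Spec_count (valid : List Int) (time : List Int) (userIn : List Int) (average : Int) (out : List Int) : Prop := out = count_alt valid time userIn average
instance (valid : List Int) (time : List Int) (userIn : List Int) (average : Int) (out : List Int) : Decidable (Spec_count valid time userIn average out) := by unfold Spec_count; infer_instance

-- ===== CLAIM (what is proved, stated in full; the proofs are below) =====
def Claim_equal_count : Prop := ∀ (valid : List Int) (time : List Int) (userIn : List Int) (average : Int), Dom_count valid time userIn average → Pre_count valid time userIn average → Spec_count valid time userIn average (count valid time userIn average)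

-- ===== LEMMAS AND PROOFS =====

-- Closed form of the zip fold used on both sides.
theorem zipfold_closed (ps : List (Int × Int)) (w : Int) (a b : Int) :
    ps.foldl (fun (p : Int × Int) q => if q.1 = w then (p.1 + q.2, p.2 + 1) else p) (a, b)
      = (a + (((ps.filter (fun q => q.1 == w)).map (·.2)).sum),
         b + ((ps.countP (fun q => q.1 == w) : Int))) := by
  induction ps generalizing a b with
  | nil => simp
  | cons q t ih =>
    rw [List.foldl_cons]
    by_cases h : q.1 = w
    · rw [if_pos h, ih]
      simp only [List.filter_cons, List.countP_cons, h, beq_self_eq_true, if_pos, List.map_cons,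
        List.sum_cons, Prod.mk.injEq]
      refine ⟨by ring, by push_cast; ring⟩
    · rw [if_neg h, ih]
      simp [h]

-- A's inner index loop equals the fold over zip(time, userIn), provided no matching
-- index lies beyond userIn's length.
theorem innerA_eq_zipfold (w : Int) (time userIn : List Int)
    (hp : ∀ t ∈ time.drop userIn.length, t ≠ w) (init : Int × Int) :
    (List.range time.length).foldl
        (fun (p : Int × Int) k =>
          if time.getD k 0 = w then (p.1 + userIn.getD k 0, p.2 + 1) else p) init
      = (time.zip userIn).foldl
          (fun (p : Int × Int) q => if q.1 = w then (p.1 + q.2, p.2 + 1) else p) init := by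
  induction time generalizing userIn init with
  | nil => simp
  | cons t ts ih =>
    rw [List.length_cons, List.range_succ_eq_map, List.foldl_cons, List.foldl_map]
    cases userIn with
    | nil =>
      have ht : t ≠ w := hp t (by simp)
      have hts : ∀ x ∈ ts.drop ([] : List Int).length, x ≠ w := by
        intro x hx
        simp only [List.length_nil, List.drop_zero] at hx
        exact hp x (by simp [hx])
      simpa [ht] using ih [] hts init
    | cons u us =>
      have hts : ∀ x ∈ ts.drop us.length, x ≠ w := by
        intro x hx
        exact hp x (by simpa using hx)
      by_cases h : t = w
      · simpa [h] using ih us hts (init.1 + u, init.2 + 1)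
      · simpa [h] using ih us hts init

-- B's sums dictionary lookup.
theorem sums_getD (ps : List (Int × Int)) (d : PySem.Dict Int Int) (v : Int) :
    (ps.foldl (fun d p => d.insert p.1 (d.getD p.1 0 + p.2)) d).getD v 0
      = d.getD v 0 + ((ps.filter (fun q => q.1 == v)).map (·.2)).sum := by
  induction ps generalizing d with
  | nil => simp
  | cons q t ih =>
    rw [List.foldl_cons, ih, PySem.Dict.getD_insert, List.filter_cons]
    by_cases h : q.1 = v
    · simp only [h, beq_self_eq_true, if_pos, List.map_cons, List.sum_cons]
      ring
    · simp [h, Ne.symm h]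

-- B's counts dictionary lookup.
theorem counts_getD (ps : List (Int × Int)) (d : PySem.Dict Int Int) (v : Int) :
    (ps.foldl (fun d p => d.insert p.1 (d.getD p.1 0 + 1)) d).getD v 0
      = d.getD v 0 + (ps.countP (fun q => q.1 == v) : Int) := by
  induction ps generalizing d with
  | nil => simp
  | cons q t ih =>
    rw [List.foldl_cons, ih, PySem.Dict.getD_insert, List.countP_cons]
    by_cases h : q.1 = v
    · simp only [h, beq_self_eq_true]
      push_cast
      ring
    · simp [h, Ne.symm h]

-- The value A appends for one valid entry w, in closed form over zip(time, userIn).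
theorem innerA_closed (w : Int) (time userIn : List Int)
    (hp : ∀ t ∈ time.drop userIn.length, t ≠ w) :
    (PySem.List.pyRange 0 (time.length : Int) 1).foldl (fun (p : Int × Int) day =>
        if PySem.List.pyGetD time day 0 = w then
          (p.1 + PySem.List.pyGetD userIn day 0, p.2 + 1)
        else p) (0, 0)
      = (((((time.zip userIn).filter (fun q => q.1 == w)).map (·.2)).sum),
         (((time.zip userIn).countP (fun q => q.1 == w) : Int))) := by
  rw [PySem.List.pyRange_zero_nat, List.foldl_map]
  simp only [PySem.List.pyGetD_natCast]
  rw [innerA_eq_zipfold w time userIn hp, zipfold_closed]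
  simp

-- ===== VERDICT (by name: the statement is the Claim_ definition above) =====
theorem count_spec : Claim_equal_count := by
  intro valid time userIn average _ hpre
  unfold Spec_count
  simp only [count, count_alt]
  rw [PySem.List.foldl_prod_mk
        (f := fun (d : PySem.Dict Int Int) (p : Int × Int) =>
          d.insert p.1 (d.getD p.1 0 + p.2))
        (g := fun (d : PySem.Dict Int Int) (p : Int × Int) =>
          d.insert p.1 (d.getD p.1 0 + 1))]
  by_cases hav : average = 0
  · simp only [hav, if_true]
    rw [PySem.List.foldl_append_singleton_eq_map
          (f := fun v =>
            ((PySem.List.pyRange 0 (time.length : Int) 1).foldl (fun (p : Int × Int) day =>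
              if PySem.List.pyGetD time day 0 = PySem.List.pyGetD valid v 0 then
                (p.1 + PySem.List.pyGetD userIn day 0, p.2 + 1)
              else p) (0, 0)).1)]
    rw [show (fun v =>
            ((PySem.List.pyRange 0 (time.length : Int) 1).foldl (fun (p : Int × Int) day =>
              if PySem.List.pyGetD time day 0 = PySem.List.pyGetD valid v 0 then
                (p.1 + PySem.List.pyGetD userIn day 0, p.2 + 1)
              else p) (0, 0)).1)
          = (fun w =>
            ((PySem.List.pyRange 0 (time.length : Int) 1).foldl (fun (p : Int × Int) day =>
              if PySem.List.pyGetD time day 0 = w then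
                (p.1 + PySem.List.pyGetD userIn day 0, p.2 + 1)
              else p) (0, 0)).1) ∘ (fun v => PySem.List.pyGetD valid v 0) from rfl,
        ← List.map_map, PySem.List.map_pyGetD_pyRange_zero']
    simp only [List.nil_append]
    apply List.map_congr_left
    intro v hv
    have hp : ∀ t ∈ time.drop userIn.length, t ≠ v := fun t ht heq => hpre t ht (heq ▸ hv)
    rw [innerA_closed v time userIn hp, sums_getD]
    simp
  · simp only [if_neg hav]
    rw [PySem.List.foldl_append_singleton_eq_map
          (f := fun v =>
            if ((PySem.List.pyRange 0 (time.length : Int) 1).foldl (fun (p : Int × Int) day =>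
              if PySem.List.pyGetD time day 0 = PySem.List.pyGetD valid v 0 then
                (p.1 + PySem.List.pyGetD userIn day 0, p.2 + 1)
              else p) (0, 0)).2 = 0 then 0
            else PySem.Int.floordiv
              ((PySem.List.pyRange 0 (time.length : Int) 1).foldl (fun (p : Int × Int) day =>
                if PySem.List.pyGetD time day 0 = PySem.List.pyGetD valid v 0 then
                  (p.1 + PySem.List.pyGetD userIn day 0, p.2 + 1)
                else p) (0, 0)).1
              ((PySem.List.pyRange 0 (time.length : Int) 1).foldl (fun (p : Int × Int) day =>
                if PySem.List.pyGetD time day 0 = PySem.List.pyGetD valid v 0 then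
                  (p.1 + PySem.List.pyGetD userIn day 0, p.2 + 1)
                else p) (0, 0)).2)]
    rw [show (fun v =>
            if ((PySem.List.pyRange 0 (time.length : Int) 1).foldl (fun (p : Int × Int) day =>
              if PySem.List.pyGetD time day 0 = PySem.List.pyGetD valid v 0 then
                (p.1 + PySem.List.pyGetD userIn day 0, p.2 + 1)
              else p) (0, 0)).2 = 0 then 0
            else PySem.Int.floordiv
              ((PySem.List.pyRange 0 (time.length : Int) 1).foldl (fun (p : Int × Int) day =>
                if PySem.List.pyGetD time day 0 = PySem.List.pyGetD valid v 0 then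
                  (p.1 + PySem.List.pyGetD userIn day 0, p.2 + 1)
                else p) (0, 0)).1
              ((PySem.List.pyRange 0 (time.length : Int) 1).foldl (fun (p : Int × Int) day =>
                if PySem.List.pyGetD time day 0 = PySem.List.pyGetD valid v 0 then
                  (p.1 + PySem.List.pyGetD userIn day 0, p.2 + 1)
                else p) (0, 0)).2)
          = (fun w =>
            if ((PySem.List.pyRange 0 (time.length : Int) 1).foldl (fun (p : Int × Int) day =>
              if PySem.List.pyGetD time day 0 = w then
                (p.1 + PySem.List.pyGetD userIn day 0, p.2 + 1)
              else p) (0, 0)).2 = 0 then 0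
            else PySem.Int.floordiv
              ((PySem.List.pyRange 0 (time.length : Int) 1).foldl (fun (p : Int × Int) day =>
                if PySem.List.pyGetD time day 0 = w then
                  (p.1 + PySem.List.pyGetD userIn day 0, p.2 + 1)
                else p) (0, 0)).1
              ((PySem.List.pyRange 0 (time.length : Int) 1).foldl (fun (p : Int × Int) day =>
                if PySem.List.pyGetD time day 0 = w then
                  (p.1 + PySem.List.pyGetD userIn day 0, p.2 + 1)
                else p) (0, 0)).2) ∘ (fun v => PySem.List.pyGetD valid v 0) from rfl,
        ← List.map_map, PySem.List.map_pyGetD_pyRange_zero']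
    simp only [List.nil_append]
    apply List.map_congr_left
    intro v hv
    have hp : ∀ t ∈ time.drop userIn.length, t ≠ v := fun t ht heq => hpre t ht (heq ▸ hv)
    rw [innerA_closed v time userIn hp, sums_getD, counts_getD]
    by_cases hc : ((time.zip userIn).countP (fun q => q.1 == v) : Int) = 0
    · simp [hc]
    · have hc' : (time.zip userIn).countP (fun q => q.1 == v) ≠ 0 := by exact_mod_cast hc
      simp [hc']
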